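-- pv_equiv track=rewrite | github.com/jcraig949jfi/Prometheus | agents/hephaestus/src/forge_primitives.py | direction_composition
-- ===== SOURCE A (Python) =====
-- def direction_composition(directions: list[str]) -> str:
--     """Compose compass directions into net direction.
--
--     Args:
--         directions: list of 'north', 'south', 'east', 'west'
--
--     Returns:
--         Net direction as string (e.g. 'north-east', 'south', 'origin').
--     """
--     dx, dy = 0, 0
--     mapping = {"north": (0, 1), "south": (0, -1), "east": (1, 0), "west": (-1, 0)}
--     for d in directions:
--         ddx, ddy = mapping.get(d.strip().lower(), (0, 0))
--         dx += ddx
--         dy += ddy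
--
--     parts = []
--     if dy > 0:
--         parts.append("north")
--     elif dy < 0:
--         parts.append("south")
--     if dx > 0:
--         parts.append("east")
--     elif dx < 0:
--         parts.append("west")
--
--     return "-".join(parts) if parts else "origin"
-- ===== SOURCE B (Python) =====
-- def direction_composition(directions: list[str]) -> str:
--     """Compose compass directions into net direction (count-based)."""
--     norm = [d.strip().lower() for d in directions]
--     dy = norm.count("north") - norm.count("south")
--     dx = norm.count("east") - norm.count("west")
--     ns = "north" if dy > 0 else "south" if dy < 0 else ""
--     ew = "east" if dx > 0 else "west" if dx < 0 else ""
--     if ns and ew: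
--         return ns + "-" + ew
--     return ns or ew or "origin"
-- ===== Notes on version B (the rewrite author's own statement) =====
-- stated objective: alternative
-- what changed: Replaces the per-element vector-accumulation loop over a direction->(dx,dy) mapping dict by a tally: normalize once, take four fixed .count lookups to get dy and dx, and build the result by direct string concatenation instead of a parts list joined with '-'.
import Mathlib
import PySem

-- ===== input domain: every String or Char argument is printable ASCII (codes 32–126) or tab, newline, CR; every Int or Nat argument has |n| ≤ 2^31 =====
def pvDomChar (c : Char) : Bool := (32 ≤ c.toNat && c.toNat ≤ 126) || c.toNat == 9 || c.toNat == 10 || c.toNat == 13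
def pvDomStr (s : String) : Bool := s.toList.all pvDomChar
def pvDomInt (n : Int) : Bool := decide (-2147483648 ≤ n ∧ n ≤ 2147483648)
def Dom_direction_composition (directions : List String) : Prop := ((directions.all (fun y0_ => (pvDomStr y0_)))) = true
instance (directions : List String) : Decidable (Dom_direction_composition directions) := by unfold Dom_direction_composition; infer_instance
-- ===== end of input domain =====

-- B replaces A's per-element vector-accumulation over a direction->(dx,dy) dict by a tally
-- (normalize once, four fixed count lookups) and direct concatenation instead of a joined parts list.

-- ===== PORT A =====
def dcMapping : PySem.Dict String (Int × Int) :=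
  PySem.Dict.ofList [("north", (0, 1)), ("south", (0, -1)), ("east", (1, 0)), ("west", (-1, 0))]

def direction_composition (directions : List String) : String :=
  let st := directions.foldl
    (fun (s : Int × Int) d =>
      let dd := dcMapping.getD (PySem.Str.lower (PySem.Str.strip d)) (0, 0)
      (s.1 + dd.1, s.2 + dd.2)) ((0 : Int), (0 : Int))
  let dx := st.1
  let dy := st.2
  let parts : List String := []
  let parts := if dy > 0 then parts ++ ["north"] else if dy < 0 then parts ++ ["south"] else parts
  let parts := if dx > 0 then parts ++ ["east"] else if dx < 0 then parts ++ ["west"] else parts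
  if parts ≠ [] then PySem.Str.join "-" parts else "origin"

-- ===== PORT B =====
def direction_composition_alt (directions : List String) : String :=
  let norm := directions.map (fun d => PySem.Str.lower (PySem.Str.strip d))
  let dy : Int := PySem.List.count norm "north" - PySem.List.count norm "south"
  let dx : Int := PySem.List.count norm "east" - PySem.List.count norm "west"
  let ns := if dy > 0 then "north" else if dy < 0 then "south" else ""
  let ew := if dx > 0 then "east" else if dx < 0 then "west" else ""
  if ns ≠ "" ∧ ew ≠ "" then ns ++ "-" ++ ew
  else if ns ≠ "" then ns else if ew ≠ "" then ew else "origin"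

-- ===== PRECONDITION & SPEC =====
def Spec_direction_composition (directions : List String) (out : String) : Prop := out = direction_composition_alt directions
instance (directions : List String) (out : String) : Decidable (Spec_direction_composition directions out) := by unfold Spec_direction_composition; infer_instance

-- ===== CLAIM (what is proved, stated in full; the proofs are below) =====
def Claim_equal_direction_composition : Prop := ∀ (directions : List String), Dom_direction_composition directions → Spec_direction_composition directions (direction_composition directions)

-- ===== LEMMAS AND PROOFS =====
lemma dcMapping_getD (s : String) : dcMapping.getD s (0, 0) =
    (if s = "north" then ((0 : Int), (1 : Int)) else if s = "south" then (0, -1)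
     else if s = "east" then (1, 0) else if s = "west" then (-1, 0) else (0, 0)) := by
  by_cases h1 : s = "north"; · subst h1; decide
  by_cases h2 : s = "south"; · subst h2; decide
  by_cases h3 : s = "east";  · subst h3; decide
  by_cases h4 : s = "west";  · subst h4; decide
  have e1 : ("north" == s) = false := by simp [beq_eq_false_iff_ne]; exact fun e => h1 e.symm
  have e2 : ("south" == s) = false := by simp [beq_eq_false_iff_ne]; exact fun e => h2 e.symm
  have e3 : ("east" == s) = false := by simp [beq_eq_false_iff_ne]; exact fun e => h3 e.symm
  have e4 : ("west" == s) = false := by simp [beq_eq_false_iff_ne]; exact fun e => h4 e.symm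
  simp [dcMapping, PySem.Dict.getD, PySem.Dict.get?, PySem.Dict.ofList, PySem.Dict.update,
        PySem.Dict.insert, PySem.Dict.empty, List.find?, e1, e2, e3, e4, h1, h2, h3, h4]

lemma dc_fold_counts (l : List String) (a b : Int) :
    l.foldl
      (fun (s : Int × Int) d =>
        let dd := dcMapping.getD (PySem.Str.lower (PySem.Str.strip d)) (0, 0)
        (s.1 + dd.1, s.2 + dd.2)) (a, b)
    = (a + ((l.map (fun d => PySem.Str.lower (PySem.Str.strip d))).count "east" : Int)
         - ((l.map (fun d => PySem.Str.lower (PySem.Str.strip d))).count "west" : Int),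
       b + ((l.map (fun d => PySem.Str.lower (PySem.Str.strip d))).count "north" : Int)
         - ((l.map (fun d => PySem.Str.lower (PySem.Str.strip d))).count "south" : Int)) := by
  induction l generalizing a b with
  | nil => simp
  | cons x t ih =>
    rw [List.foldl_cons, List.map_cons,
      show (let dd := dcMapping.getD (PySem.Str.lower (PySem.Str.strip x)) (0, 0)
            ((a, b).1 + dd.1, (a, b).2 + dd.2))
        = (a + (dcMapping.getD (PySem.Str.lower (PySem.Str.strip x)) (0, 0)).1,
           b + (dcMapping.getD (PySem.Str.lower (PySem.Str.strip x)) (0, 0)).2) from rfl,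
      ih, dcMapping_getD (PySem.Str.lower (PySem.Str.strip x))]
    by_cases h1 : PySem.Str.lower (PySem.Str.strip x) = "north" <;>
    by_cases h2 : PySem.Str.lower (PySem.Str.strip x) = "south" <;>
    by_cases h3 : PySem.Str.lower (PySem.Str.strip x) = "east" <;>
    by_cases h4 : PySem.Str.lower (PySem.Str.strip x) = "west" <;>
      simp_all [Prod.ext_iff] <;> omega

lemma dc_render (DX DY : Int) :
    (let parts : List String := []
     let parts := if DY > 0 then parts ++ ["north"] else if DY < 0 then parts ++ ["south"] else parts
     let parts := if DX > 0 then parts ++ ["east"] else if DX < 0 then parts ++ ["west"] else parts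
     if parts ≠ [] then PySem.Str.join "-" parts else "origin")
    = (let ns := if DY > 0 then "north" else if DY < 0 then "south" else ""
       let ew := if DX > 0 then "east" else if DX < 0 then "west" else ""
       if ns ≠ "" ∧ ew ≠ "" then ns ++ "-" ++ ew
       else if ns ≠ "" then ns else if ew ≠ "" then ew else "origin") := by
  by_cases hy1 : 0 < DY <;> by_cases hy2 : DY < 0 <;>
  by_cases hx1 : 0 < DX <;> by_cases hx2 : DX < 0 <;>
    first
      | omega
      | (simp only [gt_iff_lt, hy1, hy2, hx1, hx2, if_true, if_false, List.nil_append]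
         decide)

-- ===== VERDICT (by name: the statement is the Claim_ definition above) =====
theorem direction_composition_spec : Claim_equal_direction_composition := by
  intro directions _
  unfold Spec_direction_composition
  simp only [direction_composition, direction_composition_alt, PySem.List.count_eq]
  rw [dc_fold_counts]
  simp only [zero_add]
  exact dc_render _ _
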